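-- pv_equiv track=rewrite | github.com/Auto-Mech/mechanalyzer | thermfit/cbh/_tsgra.py | intersec
-- ===== SOURCE A (Python) =====
-- def intersec(lst1, lst2):
--     """ Determine index shared by broken and formed keys , verifying that
--         they intersect
--     """
--
--     ret = None
--     for atm in lst1:
--         if atm in lst2:
--             ret = atm
--     assert ret is not None, (
--         'brk_key {} and frm_key {} do not intersect'.format(lst1, lst2))
--     return ret
-- ===== SOURCE B (Python) =====
-- def intersec(lst1, lst2):
--     """ Determine index shared by broken and formed keys , verifying that
--         they intersect
--     """
--     for atm in reversed(lst1):
--         if atm in lst2: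
--             return atm
--     raise AssertionError(
--         'brk_key {} and frm_key {} do not intersect'.format(lst1, lst2))
-- ===== Notes on version B (the rewrite author's own statement) =====
-- stated objective: alternative
-- what changed: scan lst1 from the end and return the first element found in lst2 (early exit), instead of scanning the whole list forward while overwriting an accumulator
import Mathlib
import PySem

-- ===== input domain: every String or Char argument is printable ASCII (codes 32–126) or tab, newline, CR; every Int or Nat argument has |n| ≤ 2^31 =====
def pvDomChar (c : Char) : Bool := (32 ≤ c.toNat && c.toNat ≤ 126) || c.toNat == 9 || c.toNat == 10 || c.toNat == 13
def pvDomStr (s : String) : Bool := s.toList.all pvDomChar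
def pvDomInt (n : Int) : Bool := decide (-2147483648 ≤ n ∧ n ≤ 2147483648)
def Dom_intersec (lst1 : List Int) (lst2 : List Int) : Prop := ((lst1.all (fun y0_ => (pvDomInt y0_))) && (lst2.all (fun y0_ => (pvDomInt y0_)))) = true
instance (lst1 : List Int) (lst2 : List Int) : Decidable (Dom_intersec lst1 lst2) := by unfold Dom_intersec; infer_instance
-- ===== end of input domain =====

-- B scans lst1 from the end and returns the first element found in lst2 (early exit),
-- instead of A's full forward scan that overwrites an accumulator with the latest match.

-- ===== PORT A =====
-- A: ret = None; for atm in lst1: if atm in lst2: ret = atm; assert ret is not None; return ret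
-- The `none` case corresponds to the AssertionError; it is excluded by Pre_intersec.
def intersec (lst1 : List Int) (lst2 : List Int) : Int :=
  let ret : Option Int :=
    lst1.foldl (fun r atm => if lst2.contains atm then some atm else r) none
  match ret with
  | some v => v
  | none => 0  -- unreachable under Pre_intersec (Python raises AssertionError here)

-- ===== PORT B =====
-- B: for atm in reversed(lst1): if atm in lst2: return atm; raise AssertionError(...)
def intersecGoB (lst2 : List Int) : List Int → Int
  | [] => 0  -- unreachable under Pre_intersec (Python raises AssertionError here)
  | atm :: rest => if lst2.contains atm then atm else intersecGoB lst2 rest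

def intersec_alt (lst1 : List Int) (lst2 : List Int) : Int :=
  intersecGoB lst2 lst1.reverse

-- ===== PRECONDITION & SPEC =====
-- Pre_ excludes exactly the inputs with no common element, where both Pythons raise AssertionError.
def Pre_intersec (lst1 : List Int) (lst2 : List Int) : Prop := ∃ a ∈ lst1, a ∈ lst2
instance (lst1 : List Int) (lst2 : List Int) : Decidable (Pre_intersec lst1 lst2) := by unfold Pre_intersec; infer_instance

def pvWitness_intersec : List Int × List Int := ([1, 2, 3], [3, 5])

def Spec_intersec (lst1 : List Int) (lst2 : List Int) (out : Int) : Prop := out = intersec_alt lst1 lst2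
instance (lst1 : List Int) (lst2 : List Int) (out : Int) : Decidable (Spec_intersec lst1 lst2 out) := by unfold Spec_intersec; infer_instance

-- ===== CLAIM (what is proved, stated in full; the proofs are below) =====
def Claim_equal_intersec : Prop := ∀ (lst1 : List Int) (lst2 : List Int), Dom_intersec lst1 lst2 → Pre_intersec lst1 lst2 → Spec_intersec lst1 lst2 (intersec lst1 lst2)

-- ===== LEMMAS AND PROOFS =====

-- A's fold keeps the LAST match, i.e. the first match of the reversed list.
theorem foldl_last_match (lst2 : List Int) (l : List Int) (r : Option Int) :
    l.foldl (fun r atm => if lst2.contains atm then some atm else r) r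
      = match l.reverse.find? (fun a => lst2.contains a) with
        | some x => some x
        | none => r := by
  induction l generalizing r with
  | nil => simp
  | cons a l ih =>
      simp only [List.foldl_cons, ih, List.reverse_cons, List.find?_append]
      cases h : l.reverse.find? (fun a => lst2.contains a) <;>
        by_cases hc : a ∈ lst2 <;> simp [h, hc, List.find?, Option.or]

-- B's loop is first-match-with-default-0 on the reversed list.
theorem goB_eq (lst2 : List Int) (l : List Int) :
    intersecGoB lst2 l
      = match l.find? (fun a => lst2.contains a) with
        | some x => x
        | none => 0 := by
  induction l with
  | nil => rfl
  | cons a l ih =>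
      by_cases hc : a ∈ lst2 <;> simp [intersecGoB, hc, List.find?, ih]

-- ===== VERDICT (by name: the statement is the Claim_ definition above) =====
theorem intersec_spec : Claim_equal_intersec := by
  intro lst1 lst2 _ _
  unfold Spec_intersec intersec intersec_alt
  rw [foldl_last_match, goB_eq]
  cases h : lst1.reverse.find? (fun a => lst2.contains a) <;> simp [h]
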